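-- pv_equiv track=rewrite | github.com/knrobitaille/Code-Wars-Solutions | Consonant value.py | solve
-- ===== SOURCE A (Python) =====
-- def solve(s):
--
--     # set variables
--     vowels = ['a','e','i','o','u']
--     consonant_substrings = []
--
--     # find consonant substrings
--     for n, ch in enumerate(s):
--         curr_string = ''
--         count = n
--         while s[count] not in vowels:
--             curr_string += s[count]
--             count += 1
--             if count == len(s):
--                 break
--         consonant_substrings.append(curr_string)
--
--     # find highest value of consonant substrings
--     highest_value = 0
--     for i in consonant_substrings:
--         current_value = 0
--         for l in i:
--             current_value += ord(l)-96
--         if current_value > highest_value: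
--             highest_value = current_value
--
--     # return highest value
--     return highest_value
-- ===== SOURCE B (Python) =====
-- def solve(s):
--     # One right-to-left pass: keep the running consonant-suffix value, reset at vowels,
--     # track the best value seen. O(n) instead of A's O(n^2).
--     best = 0
--     acc = 0
--     for ch in reversed(s):
--         if ch in 'aeiou':
--             acc = 0
--         else:
--             acc += ord(ch) - 96
--             if acc > best:
--                 best = acc
--     return best
-- ===== Notes on version B (the rewrite author's own statement) =====
-- stated objective: faster
-- what changed: Replaces A's per-index inner while-loop (re-walking each consonant run from every start position) and its intermediate list of substrings with a single right-to-left pass maintaining a running suffix sum that resets at vowels and a running maximum.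
import Mathlib
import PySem

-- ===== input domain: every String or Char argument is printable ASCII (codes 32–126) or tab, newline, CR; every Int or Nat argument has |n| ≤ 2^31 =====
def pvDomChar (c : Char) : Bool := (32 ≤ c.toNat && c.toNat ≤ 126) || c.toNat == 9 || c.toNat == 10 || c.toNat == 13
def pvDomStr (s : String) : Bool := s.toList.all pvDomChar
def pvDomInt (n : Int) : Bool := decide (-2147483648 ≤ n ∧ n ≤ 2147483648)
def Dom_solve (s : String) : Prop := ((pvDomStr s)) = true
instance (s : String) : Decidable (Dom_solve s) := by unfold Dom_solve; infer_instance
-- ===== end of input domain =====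

-- B replaces A's per-start-index inner while-loop (O(n^2)) with one right-to-left pass
-- keeping a running suffix sum reset at vowels and a running maximum (O(n)).

-- ===== PORT A =====
def vowelsA : List Char := ['a', 'e', 'i', 'o', 'u']

-- inner `while s[count] not in vowels:` loop; count is always a valid index on entry
-- in Python (starts at an enumerate index, and the `if count == len(s): break` guard
-- fires before s[count] would go out of range) — modelled by the `count < l.length` guard.
def innerA (l : List Char) (count : Nat) (curr : List Char) : List Char :=
  if h : count < l.length then
    if l[count] ∈ vowelsA then curr
    else innerA l (count + 1) (curr ++ [l[count]])
  else curr
termination_by l.length - count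

def solve (s : String) : Int :=
  let l := s.toList
  -- `for n, ch in enumerate(s)`: enumerate indices are ≥ 0, so `.toNat` is exact here
  let consonant_substrings :=
    (PySem.List.enumerate l).foldl (fun acc p => acc ++ [innerA l p.1.toNat []]) []
  consonant_substrings.foldl
    (fun highest i =>
      let current_value := i.foldl (fun c ch => c + ((ch.toNat : Int) - 96)) 0
      if current_value > highest then current_value else highest) 0

-- ===== PORT B =====
def stepB (st : Int × Int) (ch : Char) : Int × Int :=
  if ch ∈ (['a', 'e', 'i', 'o', 'u'] : List Char) then (0, st.2)
  else
    let a := st.1 + ((ch.toNat : Int) - 96)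
    (a, if a > st.2 then a else st.2)

-- `for ch in reversed(s)` with state (acc, best)
def solve_alt (s : String) : Int :=
  (s.toList.reverse.foldl stepB (0, 0)).2

-- ===== PRECONDITION & SPEC =====
def Spec_solve (s : String) (out : Int) : Prop := out = solve_alt s
instance (s : String) (out : Int) : Decidable (Spec_solve s out) := by unfold Spec_solve; infer_instance

-- ===== CLAIM (what is proved, stated in full; the proofs are below) =====
def Claim_equal_solve : Prop := ∀ (s : String), Dom_solve s → Spec_solve s (solve s)

-- ===== LEMMAS AND PROOFS =====

-- letter value
def pvV (c : Char) : Int := (c.toNat : Int) - 96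

-- maximal consonant prefix
def pvRun (t : List Char) : List Char := t.takeWhile (fun c => !(decide (c ∈ vowelsA)))

def pvSum (t : List Char) : Int := t.foldl (fun c ch => c + pvV ch) 0

-- per-start-index run sums
def pvSums (l : List Char) : List Int :=
  (List.range l.length).map (fun n => pvSum (pvRun (l.drop n)))

def pvBest (l : List Char) : Int := (pvSums l).foldr max 0

theorem pvSum_shift (t : List Char) (a : Int) :
    t.foldl (fun c ch => c + pvV ch) a = a + pvSum t := by
  induction t generalizing a with
  | nil => simp [pvSum]
  | cons c t ih =>
    simp only [pvSum, List.foldl_cons]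
    rw [ih, ih (0 + pvV c)]; ring

theorem pvSum_cons (c : Char) (t : List Char) : pvSum (c :: t) = pvV c + pvSum t := by
  have h : pvSum (c :: t) = t.foldl (fun c ch => c + pvV ch) (0 + pvV c) := rfl
  rw [h, pvSum_shift]; ring

theorem innerA_eq (l : List Char) (count : Nat) (curr : List Char) :
    innerA l count curr = curr ++ pvRun (l.drop count) := by
  induction count, curr using innerA.induct (l := l) with
  | case1 count curr h hv =>
    have hdrop : pvRun (l.drop count) = [] := by
      rw [pvRun, List.drop_eq_getElem_cons h, List.takeWhile_cons]
      simp [hv]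
    rw [innerA]
    simp [h, hv, hdrop]
  | case2 count curr h hv ih =>
    have hdrop : pvRun (l.drop count) = l[count] :: pvRun (l.drop (count + 1)) := by
      rw [pvRun, List.drop_eq_getElem_cons h, List.takeWhile_cons]
      simp [pvRun, hv]
    rw [innerA]
    simp only [h, dif_pos]
    rw [if_neg hv, ih, hdrop]
    simp
  | case3 count curr h =>
    rw [innerA]
    simp only [h, dif_neg, not_false_iff]
    rw [List.drop_eq_nil_of_le (by omega)]
    simp [pvRun]

theorem enumFold (t : List Char) (n : Nat) (g : Nat → List Char) (acc : List (List Char)) :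
    (PySem.List.enumerate t (n : Int)).foldl (fun acc p => acc ++ [g p.1.toNat]) acc
      = acc ++ (List.range t.length).map (fun k => g (n + k)) := by
  induction t generalizing n acc with
  | nil => simp [PySem.List.enumerate_nil]
  | cons c t ih =>
    rw [PySem.List.enumerate_cons, List.foldl_cons]
    have : ((n : Int) + 1) = ((n + 1 : Nat) : Int) := by push_cast; ring
    rw [this, ih]
    simp only [List.length_cons, List.range_succ_eq_map, List.map_cons, List.map_map,
      Int.toNat_natCast]
    simp only [List.append_assoc, List.cons_append, List.nil_append]
    have hmap : (List.range t.length).map (fun k => g (n + 1 + k))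
        = (List.range t.length).map ((fun k => g (n + k)) ∘ Nat.succ) := by
      apply List.map_congr_left
      intro k _
      simp only [Function.comp_apply]
      congr 1
      omega
    rw [hmap, Nat.add_zero]

theorem maxfold_eq (xs : List Int) (a : Int) (ha : 0 ≤ a) :
    xs.foldl (fun h v => if v > h then v else h) a = max a (xs.foldr max 0) := by
  induction xs generalizing a with
  | nil => simp; omega
  | cons x xs ih =>
    rw [List.foldl_cons, List.foldr_cons,
      ih (if x > a then x else a) (by split_ifs <;> omega)]
    split_ifs <;> omega

theorem pvSums_cons (c : Char) (t : List Char) :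
    pvSums (c :: t) = pvSum (pvRun (c :: t)) :: pvSums t := by
  simp only [pvSums, List.length_cons, List.range_succ_eq_map, List.map_cons, List.map_map]
  rfl

theorem pvBest_nonneg (l : List Char) : 0 ≤ pvBest l := by
  unfold pvBest
  induction pvSums l with
  | nil => simp
  | cons x xs ih => rw [List.foldr_cons]; omega

theorem foldrB (l : List Char) :
    l.foldr (fun x y => stepB y x) (0, 0) = (pvSum (pvRun l), pvBest l) := by
  induction l with
  | nil => simp [pvRun, pvSum, pvBest, pvSums]
  | cons c t ih =>
    rw [List.foldr_cons, ih]
    have hb := pvBest_nonneg t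
    have hcons : pvBest (c :: t) = max (pvSum (pvRun (c :: t))) (pvBest t) := by
      rw [pvBest, pvSums_cons, List.foldr_cons]; rfl
    by_cases hv : c ∈ vowelsA
    · have hrun : pvRun (c :: t) = [] := by
        simp [pvRun, hv]
      have h1 : stepB (pvSum (pvRun t), pvBest t) c = (0, pvBest t) := by
        simp [stepB, show c ∈ (['a', 'e', 'i', 'o', 'u'] : List Char) from hv]
      rw [h1, hcons, hrun, show pvSum ([] : List Char) = 0 from rfl]
      congr 1
      omega
    · have hrun : pvRun (c :: t) = c :: pvRun t := by
        simp [pvRun, hv]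
      have hv' : c ∉ (['a', 'e', 'i', 'o', 'u'] : List Char) := hv
      have h1 : stepB (pvSum (pvRun t), pvBest t) c =
          (pvV c + pvSum (pvRun t),
           if pvV c + pvSum (pvRun t) > pvBest t then pvV c + pvSum (pvRun t)
           else pvBest t) := by
        simp only [stepB, if_neg hv']
        have : pvSum (pvRun t) + ((c.toNat : Int) - 96) = pvV c + pvSum (pvRun t) := by
          unfold pvV; ring
        rw [this]
      rw [h1, hcons, hrun, pvSum_cons]
      congr 1
      split_ifs <;> omega

-- ===== VERDICT (by name: the statement is the Claim_ definition above) =====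
theorem solve_spec : Claim_equal_solve := by
  intro s _
  unfold Spec_solve solve solve_alt
  rw [List.foldl_reverse, foldrB]
  dsimp only
  rw [show (PySem.List.enumerate s.toList) = PySem.List.enumerate s.toList ((0 : Nat) : Int) from rfl,
    enumFold s.toList 0 (fun n => innerA s.toList n []) []]
  simp only [List.nil_append, zero_add]
  have hsubs : (List.range s.toList.length).map (fun k => innerA s.toList k []) =
      (List.range s.toList.length).map (fun n => pvRun (s.toList.drop n)) := by
    apply List.map_congr_left; intro k _
    rw [innerA_eq]; simp
  rw [hsubs]
  have hfm : ((List.range s.toList.length).map (fun n => pvRun (s.toList.drop n))).foldl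
      (fun highest i =>
        let current_value := i.foldl (fun c ch => c + ((ch.toNat : Int) - 96)) 0
        if current_value > highest then current_value else highest) 0
      = (pvSums s.toList).foldl (fun h v => if v > h then v else h) 0 := by
    rw [pvSums, List.foldl_map, List.foldl_map]
    rfl
  rw [hfm, maxfold_eq _ 0 le_rfl]
  have := pvBest_nonneg s.toList
  unfold pvBest at this ⊢
  omega
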